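-- pv_equiv track=rewrite | github.com/LTYoung/ec551prog2 | fse.py | get_relevant_minterms
-- ===== SOURCE A (Python) =====
-- def is_combination_relevant(minterm, combination, num_literals, oliteral):
--     binary_repr = format(minterm, f"0{num_literals}b")
--     output = all(binary_repr[oliteral.index(lit)] != "0" for lit in combination)
--     return output
--
-- def get_relevant_minterms(combination, num_literals, oliteral, table):
--     relevant_minterms = []
--     for minterm in range(2**num_literals):
--         if (
--             is_combination_relevant(minterm, combination, num_literals, oliteral)
--             and minterm in table
--         ):
--             relevant_minterms.append(minterm)
--     return relevant_minterms
-- ===== SOURCE B (Python) =====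
-- def get_relevant_minterms(combination, num_literals, oliteral, table):
--     # Scan the (deduplicated, sorted) table and test the required bits directly,
--     # instead of enumerating all 2**num_literals minterms.
--     shifts = [num_literals - 1 - oliteral.index(lit) for lit in combination]
--     out = []
--     for m in sorted(set(table)):
--         if 0 <= m < 2 ** num_literals and all((m >> s) & 1 for s in shifts):
--             out.append(m)
--     return out
-- ===== Notes on version B (the rewrite author's own statement) =====
-- stated objective: faster
-- what changed: B precomputes the required bit shifts once and scans the sorted deduplicated table testing those bits, instead of enumerating all 2**num_literals minterms and re-scanning combination, oliteral and table for each one.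
-- outside the precondition, e.g. on get_relevant_minterms([1], 0, [1], [0]): A returns [], B raises ValueError
import Mathlib
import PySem

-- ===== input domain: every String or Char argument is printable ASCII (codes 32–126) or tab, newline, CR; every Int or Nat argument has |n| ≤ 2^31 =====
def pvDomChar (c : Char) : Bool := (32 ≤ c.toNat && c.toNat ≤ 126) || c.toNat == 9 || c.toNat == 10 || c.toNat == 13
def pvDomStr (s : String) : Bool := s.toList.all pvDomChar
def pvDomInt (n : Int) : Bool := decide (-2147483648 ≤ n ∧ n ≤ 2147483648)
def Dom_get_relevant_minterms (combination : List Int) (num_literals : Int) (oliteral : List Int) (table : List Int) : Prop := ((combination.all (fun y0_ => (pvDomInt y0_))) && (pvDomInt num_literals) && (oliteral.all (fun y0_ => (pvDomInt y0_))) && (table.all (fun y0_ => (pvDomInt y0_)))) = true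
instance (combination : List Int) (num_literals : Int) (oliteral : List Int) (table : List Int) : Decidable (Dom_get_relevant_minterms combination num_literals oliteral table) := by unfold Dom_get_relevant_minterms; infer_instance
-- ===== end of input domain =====

-- B scans the sorted deduplicated table testing the required bits with precomputed
-- shifts, instead of enumerating all 2**num_literals minterms (objective: faster).

-- ===== PORT A =====
-- format(m, f"0{w}b") for 0 ≤ m < 2^w (every minterm of A's loop): exactly the w
-- binary digits of m, most significant first, left-padded with '0'.
def pybits (w : Nat) (m : Nat) : List Char :=
  match w with
  | 0 => []
  | Nat.succ w' => pybits w' (m / 2) ++ [if m % 2 == 1 then '1' else '0']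

def is_combination_relevant (minterm : Int) (combination : List Int) (num_literals : Int) (oliteral : List Int) : Bool :=
  let binary_repr := pybits num_literals.toNat minterm.toNat
  combination.all (fun lit =>
    match PySem.List.index? oliteral lit with
    | some i => binary_repr.getD i '0' != '0'  -- Python raises when lit ∉ oliteral or i out of range: excluded by Pre_
    | none => false)

def get_relevant_minterms (combination : List Int) (num_literals : Int) (oliteral : List Int) (table : List Int) : List Int :=
  (PySem.List.pyRange 0 ((2 : Int) ^ num_literals.toNat) 1).foldl
    (fun relevant_minterms minterm =>
      if is_combination_relevant minterm combination num_literals oliteral && table.contains minterm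
      then relevant_minterms ++ [minterm] else relevant_minterms) []

-- ===== PORT B =====
def get_relevant_minterms_alt (combination : List Int) (num_literals : Int) (oliteral : List Int) (table : List Int) : List Int :=
  let shifts := combination.map (fun lit =>
    num_literals - 1 - (((PySem.List.index? oliteral lit).getD 0 : Nat) : Int))  -- Python raises when lit ∉ oliteral: excluded by Pre_
  (PySem.List.sorted (PySem.Set.ofList table) (fun x => x) false).foldl
    (fun out m =>
      if decide (0 ≤ m) && decide (m < (2 : Int) ^ num_literals.toNat) &&
         shifts.all (fun s => (m.toNat >>> s.toNat) % 2 == 1)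
      then out ++ [m] else out) []

-- ===== PRECONDITION & SPEC =====
-- Pre_ excludes inputs where num_literals < 0 or some literal of combination has no
-- occurrence in oliteral at an index < num_literals: there A raises (TypeError /
-- ValueError / IndexError, reached at the all-ones minterm) except in the
-- num_literals = 0 corner where A returns [] by all()-short-circuit while B's
-- negative shift raises ValueError.
def Pre_get_relevant_minterms (combination : List Int) (num_literals : Int) (oliteral : List Int) (table : List Int) : Prop :=
  0 ≤ num_literals ∧
  ∀ lit ∈ combination,
    (PySem.List.index? oliteral lit).any (fun (i : Nat) => decide ((i : Int) < num_literals)) = true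

instance (combination : List Int) (num_literals : Int) (oliteral : List Int) (table : List Int) : Decidable (Pre_get_relevant_minterms combination num_literals oliteral table) := by unfold Pre_get_relevant_minterms; infer_instance

def pvWitness_get_relevant_minterms : List Int × Int × List Int × List Int :=
  ([1], 2, [1, 2], [0, 3, 2])

def Spec_get_relevant_minterms (combination : List Int) (num_literals : Int) (oliteral : List Int) (table : List Int) (out : List Int) : Prop := out = get_relevant_minterms_alt combination num_literals oliteral table
instance (combination : List Int) (num_literals : Int) (oliteral : List Int) (table : List Int) (out : List Int) : Decidable (Spec_get_relevant_minterms combination num_literals oliteral table out) := by unfold Spec_get_relevant_minterms; infer_instance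

-- ===== CLAIM (what is proved, stated in full; the proofs are below) =====
def Claim_equal_get_relevant_minterms : Prop := ∀ (combination : List Int) (num_literals : Int) (oliteral : List Int) (table : List Int), Dom_get_relevant_minterms combination num_literals oliteral table → Pre_get_relevant_minterms combination num_literals oliteral table → Spec_get_relevant_minterms combination num_literals oliteral table (get_relevant_minterms combination num_literals oliteral table)

-- ===== LEMMAS AND PROOFS =====

theorem pybits_length (w m : Nat) : (pybits w m).length = w := by
  induction w generalizing m with
  | zero => rfl
  | succ w ih => simp [pybits, ih]

theorem pybits_getD (w m i : Nat) (h : i < w) :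
    (pybits w m).getD i '0' = (if m >>> (w - 1 - i) % 2 == 1 then '1' else '0') := by
  induction w generalizing m i with
  | zero => omega
  | succ w ih =>
    rcases Nat.lt_or_ge i w with hi | hi
    · have hlen : i < (pybits w (m / 2)).length := by rw [pybits_length]; exact hi
      have : (pybits (w + 1) m).getD i '0' = (pybits w (m / 2)).getD i '0' := by
        simp [pybits, List.getD, List.getElem?_append_left hlen]
      rw [this, ih (m / 2) i hi]
      have hs : (m / 2) >>> (w - 1 - i) = m >>> (w - i) := by
        have : w - i = (w - 1 - i) + 1 := by omega
        rw [this, Nat.shiftRight_succ_inside]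
      rw [hs]
      have : w + 1 - 1 - i = w - i := by omega
      rw [this]
    · have hiw : i = w := by omega
      subst hiw
      have hlen : (pybits i (m / 2)).length = i := pybits_length i (m / 2)
      have : (pybits (i + 1) m).getD i '0' = (if m % 2 == 1 then '1' else '0') := by
        simp [pybits, List.getD, hlen]
      rw [this]
      have : i + 1 - 1 - i = 0 := by omega
      rw [this, Nat.shiftRight_zero]

theorem strict_sorted_ext {l1 l2 : List Int} (h1 : l1.Pairwise (· < ·))
    (h2 : l2.Pairwise (· < ·)) (h : ∀ x, x ∈ l1 ↔ x ∈ l2) : l1 = l2 := by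
  have p : l1.Perm l2 := List.perm_of_nodup_nodup_toFinset_eq (h1.imp ne_of_lt) (h2.imp ne_of_lt)
    (by ext x; simp only [List.mem_toFinset]; exact h x)
  exact List.Perm.eq_of_pairwise (fun a b _ _ hab hba => by omega) h1 h2 p

-- A's per-minterm test agrees with B's bit test, for minterms inside the range.
theorem rel_eq_bits (combination : List Int) (num_literals : Int) (oliteral : List Int)
    (hc : ∀ lit ∈ combination,
      (PySem.List.index? oliteral lit).any (fun (i : Nat) => decide ((i : Int) < num_literals)) = true)
    (m : Int) :
    is_combination_relevant m combination num_literals oliteral =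
      (combination.map (fun lit =>
          num_literals - 1 - (((PySem.List.index? oliteral lit).getD 0 : Nat) : Int))).all
        (fun s => (m.toNat >>> s.toNat) % 2 == 1) := by
  have hpt : ∀ lit ∈ combination,
      (match PySem.List.index? oliteral lit with
        | some i => (pybits num_literals.toNat m.toNat).getD i '0' != '0'
        | none => false)
      = ((m.toNat >>> (num_literals - 1 - (((PySem.List.index? oliteral lit).getD 0 : Nat) : Int)).toNat) % 2 == 1) := by
    intro lit hlit
    have hidx0 := hc lit hlit
    rcases hidx : PySem.List.index? oliteral lit with _ | i
    · rw [hidx] at hidx0; simp [Option.any] at hidx0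
    · rw [hidx] at hidx0
      simp only [Option.any, decide_eq_true_eq] at hidx0
      have hin : i < num_literals.toNat := by omega
      simp only [Option.getD_some]
      rw [pybits_getD num_literals.toNat m.toNat i hin]
      have hs : (num_literals - 1 - (i : Int)).toNat = num_literals.toNat - 1 - i := by omega
      rw [hs]
      cases hb : m.toNat >>> (num_literals.toNat - 1 - i) % 2 == 1 <;> decide
  simp only [is_combination_relevant, List.all_map]
  rw [Bool.eq_iff_iff]
  simp only [List.all_eq_true, Function.comp_apply]
  constructor <;> intro H lit hl
  · rw [← hpt lit hl]; exact H lit hl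
  · rw [hpt lit hl]; exact H lit hl

theorem get_relevant_minterms_eq_filter (combination : List Int) (num_literals : Int)
    (oliteral : List Int) (table : List Int) :
    get_relevant_minterms combination num_literals oliteral table =
      (PySem.List.pyRange 0 ((2 : Int) ^ num_literals.toNat) 1).filter
        (fun m => is_combination_relevant m combination num_literals oliteral && table.contains m) := by
  rw [get_relevant_minterms, PySem.List.foldl_append_if_eq_filter]
  simp

theorem get_relevant_minterms_alt_eq_filter (combination : List Int) (num_literals : Int)
    (oliteral : List Int) (table : List Int) :
    get_relevant_minterms_alt combination num_literals oliteral table =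
      (PySem.List.sorted (PySem.Set.ofList table) (fun x => x) false).filter
        (fun m => decide (0 ≤ m) && decide (m < (2 : Int) ^ num_literals.toNat) &&
          (combination.map (fun lit =>
            num_literals - 1 - (((PySem.List.index? oliteral lit).getD 0 : Nat) : Int))).all
            (fun s => (m.toNat >>> s.toNat) % 2 == 1)) := by
  rw [get_relevant_minterms_alt, PySem.List.foldl_append_if_eq_filter]
  simp

-- ===== VERDICT (by name: the statement is the Claim_ definition above) =====
theorem get_relevant_minterms_spec : Claim_equal_get_relevant_minterms := by
  intro combination num_literals oliteral table _hDom hPre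
  obtain ⟨_hn, hc⟩ := hPre
  unfold Spec_get_relevant_minterms
  rw [get_relevant_minterms_eq_filter, get_relevant_minterms_alt_eq_filter]
  apply strict_sorted_ext
  · exact (PySem.List.pairwise_lt_pyRange_one 0 _).filter _
  · exact (PySem.List.sorted_ofList_pairwise_lt table).filter _
  · intro x
    simp only [List.mem_filter, PySem.List.mem_pyRange_one, PySem.List.mem_sorted,
      PySem.Set.mem_ofList, Bool.and_eq_true, decide_eq_true_eq, List.contains_eq_mem]
    constructor
    · rintro ⟨⟨hx0, hx1⟩, hrel, hmem⟩
      refine ⟨hmem, ⟨hx0, hx1⟩, ?_⟩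
      rw [← rel_eq_bits combination num_literals oliteral hc x]
      exact hrel
    · rintro ⟨hmem, ⟨hx0, hx1⟩, hbits⟩
      refine ⟨⟨hx0, hx1⟩, ?_, hmem⟩
      rw [rel_eq_bits combination num_literals oliteral hc x]
      exact hbits
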